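-- pv_equiv track=rewrite | github.com/CrispyOrangeSlices/advent | 2023/d3/p1.py | determine_number
-- ===== SOURCE A (Python) =====
-- def determine_number(num, cdx, ldx, valid_nums, content):
--     is_part = False
--     for ndx, n in enumerate(num):
--         adx = cdx - (len(num) - ndx)
--         if enumerate_position(ldx, adx, content):
--             is_part = True
--     if is_part:
--         valid_nums.append(int(num))
--         num = ""
--         is_part = False
--
--     return valid_nums
--
-- def enumerate_position(x, y, content):
--     ops = {-1, 0, 1}
--     for i in ops:
--         for j in ops:
--             if check_position(x + i, y + j, content):
--                 return True
--     return False
--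
-- def check_position(x, y, content):
--     if x in range(0, len(content)):
--         if y in range(0, len(content[x])):
--             if content[x][y] in {"&", "%", "-", "@", "+", "=", "$", "/", "#", "*"}:
--                 return True
--             else:
--                 return False
-- ===== SOURCE B (Python) =====
-- SYMBOLS = set("&%-@+=$/#*")
--
-- def determine_number(num, cdx, ldx, valid_nums, content):
--     # Single bounding-rectangle scan instead of per-digit 3x3 scans.
--     if num:
--         first = cdx - len(num)
--         hit = False
--         for r in range(ldx - 1, ldx + 2):
--             if 0 <= r < len(content):
--                 row = content[r]
--                 for c in range(first - 1, cdx + 1):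
--                     if 0 <= c < len(row) and row[c] in SYMBOLS:
--                         hit = True
--                         break
--                 if hit:
--                     break
--         if hit:
--             valid_nums.append(int(num))
--     return valid_nums
-- ===== Notes on version B (the rewrite author's own statement) =====
-- stated objective: faster
-- what changed: Replaces the per-digit overlapping 3x3 neighbourhood scans with one scan of the bounding rectangle of the digit span (rows ldx-1..ldx+1, cols cdx-len(num)-1..cdx), stopping at the first symbol hit.
import Mathlib
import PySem

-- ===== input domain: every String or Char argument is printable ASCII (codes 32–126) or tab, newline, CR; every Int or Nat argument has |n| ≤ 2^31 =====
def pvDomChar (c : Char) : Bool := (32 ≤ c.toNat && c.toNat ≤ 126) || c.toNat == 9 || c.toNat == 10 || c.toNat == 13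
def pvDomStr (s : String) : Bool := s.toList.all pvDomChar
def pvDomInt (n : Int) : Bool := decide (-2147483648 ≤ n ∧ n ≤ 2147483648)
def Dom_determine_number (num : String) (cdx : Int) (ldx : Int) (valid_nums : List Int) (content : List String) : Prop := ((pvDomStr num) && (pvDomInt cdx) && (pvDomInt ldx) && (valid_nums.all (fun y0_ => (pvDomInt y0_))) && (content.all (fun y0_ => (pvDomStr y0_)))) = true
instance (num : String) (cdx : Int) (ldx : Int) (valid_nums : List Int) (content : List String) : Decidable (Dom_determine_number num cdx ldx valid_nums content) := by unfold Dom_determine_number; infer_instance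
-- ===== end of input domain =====

-- B replaces A's per-digit overlapping 3x3 neighbourhood scans by one scan of the
-- bounding rectangle of the digit span (objective: simpler).  Python A appends to
-- valid_nums in place (B does the same); the equivalence proved is about the return value.

-- ===== PORT A =====
def pySymbols : List Char := ['&', '%', '-', '@', '+', '=', '$', '/', '#', '*']

def check_position (x y : Int) (content : List String) : Bool :=
  if 0 ≤ x ∧ x < (content.length : Int) then
    let row := (content.getD x.toNat "").toList
    if 0 ≤ y ∧ y < (row.length : Int) then
      decide (row.getD y.toNat ' ' ∈ pySymbols)
    else false
  else false

def enumerate_position (x y : Int) (content : List String) : Bool :=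
  ([-1, 0, 1] : List Int).any (fun i =>
    ([-1, 0, 1] : List Int).any (fun j =>
      check_position (x + i) (y + j) content))

def determine_number (num : String) (cdx : Int) (ldx : Int) (valid_nums : List Int) (content : List String) : List Int :=
  let L : Int := num.toList.length
  let is_part := (List.range num.toList.length).foldl
    (fun b ndx => if enumerate_position ldx (cdx - (L - ndx)) content then true else b) false
  if is_part then valid_nums ++ [(PySem.Int.ofStr? num).getD 0] else valid_nums

-- ===== PORT B =====
def determine_number_alt (num : String) (cdx : Int) (ldx : Int) (valid_nums : List Int) (content : List String) : List Int :=
  if num.toList.length ≠ 0 then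
    let first : Int := cdx - num.toList.length
    let hit := (PySem.List.pyRange (ldx - 1) (ldx + 2) 1).any (fun r =>
      decide (0 ≤ r ∧ r < (content.length : Int)) &&
        (let row := (content.getD r.toNat "").toList
         (PySem.List.pyRange (first - 1) (cdx + 1) 1).any (fun c =>
           decide (0 ≤ c ∧ c < (row.length : Int)) && decide (row.getD c.toNat ' ' ∈ (['&', '%', '-', '@', '+', '=', '$', '/', '#', '*'] : List Char)))))
    if hit then valid_nums ++ [(PySem.Int.ofStr? num).getD 0] else valid_nums
  else valid_nums

-- ===== PRECONDITION & SPEC =====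
-- Bool test used only by Pre_: is there a symbol at cell (r, c) of content?
def pvSymbolCell (r c : Int) (content : List String) : Bool :=
  decide (0 ≤ r ∧ r < (content.length : Int)) &&
  decide (0 ≤ c ∧ c < ((content.getD r.toNat "").toList.length : Int)) &&
  decide ((content.getD r.toNat "").toList.getD c.toNat ' '
            ∈ (['&', '%', '-', '@', '+', '=', '$', '/', '#', '*'] : List Char))

-- Pre_ excludes exactly the inputs on which A raises ValueError: num is non-empty,
-- not an int literal, and some cell adjacent to the digit span holds a symbol (so int(num) is called).
def Pre_determine_number (num : String) (cdx : Int) (ldx : Int) (valid_nums : List Int) (content : List String) : Prop :=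
  num = "" ∨ (PySem.Int.ofStr? num).isSome = true ∨
    ∀ r ∈ PySem.List.pyRange (ldx - 1) (ldx + 2) 1,
      ∀ c ∈ PySem.List.pyRange (cdx - num.toList.length - 1) (cdx + 1) 1,
        pvSymbolCell r c content = false
instance (num : String) (cdx : Int) (ldx : Int) (valid_nums : List Int) (content : List String) : Decidable (Pre_determine_number num cdx ldx valid_nums content) := by unfold Pre_determine_number; infer_instance

def pvWitness_determine_number : String × Int × Int × List Int × List String :=
  ("12", 2, 0, [7], ["12*", "..."])

def Spec_determine_number (num : String) (cdx : Int) (ldx : Int) (valid_nums : List Int) (content : List String) (out : List Int) : Prop := out = determine_number_alt num cdx ldx valid_nums content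
instance (num : String) (cdx : Int) (ldx : Int) (valid_nums : List Int) (content : List String) (out : List Int) : Decidable (Spec_determine_number num cdx ldx valid_nums content out) := by unfold Spec_determine_number; infer_instance

-- ===== CLAIM (what is proved, stated in full; the proofs are below) =====
def Claim_equal_determine_number : Prop := ∀ (num : String) (cdx : Int) (ldx : Int) (valid_nums : List Int) (content : List String), Dom_determine_number num cdx ldx valid_nums content → Pre_determine_number num cdx ldx valid_nums content → Spec_determine_number num cdx ldx valid_nums content (determine_number num cdx ldx valid_nums content)

-- ===== LEMMAS AND PROOFS =====

-- A's cell test, characterised.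
lemma check_position_iff (x y : Int) (content : List String) :
    check_position x y content = true ↔
      (0 ≤ x ∧ x < (content.length : Int)) ∧
      (0 ≤ y ∧ y < ((content.getD x.toNat "").toList.length : Int)) ∧
      (content.getD x.toNat "").toList.getD y.toNat ' ' ∈ pySymbols := by
  unfold check_position
  split_ifs <;> simp_all

-- The union of the 3x3 windows around (ldx, cdx - (n - ndx)) for ndx = 0..n-1
-- is the bounding rectangle rows ldx-1..ldx+1, cols cdx-n-1..cdx (for n ≥ 1).
lemma rect_iff (P : Int → Int → Prop) (n cdx ldx : Int) (hn : 1 ≤ n) :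
    (∃ ndx : Int, (0 ≤ ndx ∧ ndx < n) ∧ ∃ i, (i = -1 ∨ i = 0 ∨ i = 1) ∧
        ∃ j, (j = -1 ∨ j = 0 ∨ j = 1) ∧ P (ldx + i) (cdx - (n - ndx) + j)) ↔
    (∃ r, (ldx - 1 ≤ r ∧ r < ldx + 2) ∧ ∃ c, (cdx - n - 1 ≤ c ∧ c < cdx + 1) ∧ P r c) := by
  constructor
  · rintro ⟨ndx, h0, i, hi, j, hj, hP⟩
    exact ⟨ldx + i, by omega, cdx - (n - ndx) + j, by omega, hP⟩
  · rintro ⟨r, hr, c, hc, hP⟩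
    refine ⟨max 0 (min (c - (cdx - n)) (n - 1)), by omega, r - ldx, by omega,
            c - (cdx - (n - max 0 (min (c - (cdx - n)) (n - 1)))), by omega, ?_⟩
    have h1 : ldx + (r - ldx) = r := by ring
    have h2 : cdx - (n - max 0 (min (c - (cdx - n)) (n - 1))) +
        (c - (cdx - (n - max 0 (min (c - (cdx - n)) (n - 1))))) = c := by ring
    rw [h1, h2]; exact hP

-- main equality, no precondition needed (on ValueError inputs both ports append the same default)
lemma ports_eq (num : String) (cdx ldx : Int) (valid_nums : List Int) (content : List String) :
    determine_number num cdx ldx valid_nums content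
      = determine_number_alt num cdx ldx valid_nums content := by
  unfold determine_number determine_number_alt
  by_cases hnum : num.toList.length = 0
  · simp [hnum]
  · have hn : 1 ≤ (num.toList.length : Int) := by
      have : 1 ≤ num.toList.length := Nat.one_le_iff_ne_zero.mpr hnum
      exact_mod_cast this
    simp only [hnum, if_true, ne_eq, not_false_iff]
    have key :
        ((List.range num.toList.length).foldl
          (fun b ndx => if enumerate_position ldx (cdx - ((num.toList.length : Int) - ndx)) content then true else b) false)
        = ((PySem.List.pyRange (ldx - 1) (ldx + 2) 1).any (fun r =>
            decide (0 ≤ r ∧ r < (content.length : Int)) &&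
              ((PySem.List.pyRange (cdx - (num.toList.length : Int) - 1) (cdx + 1) 1).any (fun c =>
                decide (0 ≤ c ∧ c < (((content.getD r.toNat "").toList.length : Int))) &&
                decide ((content.getD r.toNat "").toList.getD c.toNat ' ' ∈ (['&', '%', '-', '@', '+', '=', '$', '/', '#', '*'] : List Char)))))) := by
      rw [PySem.List.foldl_if_true_eq]
      rw [Bool.eq_iff_iff]
      simp only [Bool.false_or, List.any_eq_true, enumerate_position,
        List.any_cons, List.any_nil, Bool.or_eq_true, Bool.or_false, Bool.and_eq_true,
        decide_eq_true_eq, PySem.List.mem_pyRange_one, check_position_iff, pySymbols]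
      constructor
      · rintro ⟨ndx, hndx, hex⟩
        have hL : num.toList.length = num.length := by simp
        obtain ⟨a, ha, rfl⟩ := (by simpa using hndx : ∃ a < num.length, ndx = (a : ℤ))
        have hij : ∃ i, (i = -1 ∨ i = 0 ∨ i = 1) ∧ ∃ j, (j = -1 ∨ j = 0 ∨ j = 1) ∧
            (0 ≤ ldx + i ∧ ldx + i < (content.length : Int)) ∧
            (0 ≤ cdx - ((num.toList.length : Int) - (a : Int)) + j ∧
              cdx - ((num.toList.length : Int) - (a : Int)) + j < ((content.getD (ldx + i).toNat "").toList.length : Int)) ∧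
            (content.getD (ldx + i).toNat "").toList.getD (cdx - ((num.toList.length : Int) - (a : Int)) + j).toNat ' '
              ∈ (['&', '%', '-', '@', '+', '=', '$', '/', '#', '*'] : List Char) := by
          rcases hex with (h|h|h)|(h|h|h)|(h|h|h) <;>
            first
              | exact ⟨-1, by norm_num, -1, by norm_num, h⟩
              | exact ⟨-1, by norm_num, 0, by norm_num, h⟩
              | exact ⟨-1, by norm_num, 1, by norm_num, h⟩
              | exact ⟨0, by norm_num, -1, by norm_num, h⟩
              | exact ⟨0, by norm_num, 0, by norm_num, h⟩
              | exact ⟨0, by norm_num, 1, by norm_num, h⟩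
              | exact ⟨1, by norm_num, -1, by norm_num, h⟩
              | exact ⟨1, by norm_num, 0, by norm_num, h⟩
              | exact ⟨1, by norm_num, 1, by norm_num, h⟩
        obtain ⟨r, hr, c, hc, h1, h2, h3⟩ := (rect_iff
          (fun r c => (0 ≤ r ∧ r < (content.length : Int)) ∧
            (0 ≤ c ∧ c < ((content.getD r.toNat "").toList.length : Int)) ∧
            (content.getD r.toNat "").toList.getD c.toNat ' ' ∈ (['&', '%', '-', '@', '+', '=', '$', '/', '#', '*'] : List Char))
          (num.toList.length : Int) cdx ldx hn).mp ⟨(a : Int), ⟨by omega, by omega⟩, hij⟩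
        exact ⟨r, hr, h1, c, hc, h2, h3⟩
      · rintro ⟨r, hr, hbr, c, hc, hbc, hsym⟩
        obtain ⟨ndx, hndx, i, hi, j, hj, hP⟩ := (rect_iff
          (fun r c => (0 ≤ r ∧ r < (content.length : Int)) ∧
            (0 ≤ c ∧ c < ((content.getD r.toNat "").toList.length : Int)) ∧
            (content.getD r.toNat "").toList.getD c.toNat ' ' ∈ (['&', '%', '-', '@', '+', '=', '$', '/', '#', '*'] : List Char))
          (num.toList.length : Int) cdx ldx hn).mpr ⟨r, hr, c, hc, hbr, hbc, hsym⟩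
        have hL : num.toList.length = num.length := by simp
        refine ⟨ndx, ?_, ?_⟩
        · have hm : ∃ a < num.length, ndx = (a : ℤ) := ⟨ndx.toNat, by omega, by omega⟩
          simpa using hm
        · rcases hi with rfl|rfl|rfl <;> rcases hj with rfl|rfl|rfl <;>
            first
              | exact Or.inl (Or.inl hP)
              | exact Or.inl (Or.inr (Or.inl hP))
              | exact Or.inl (Or.inr (Or.inr hP))
              | exact Or.inr (Or.inl (Or.inl hP))
              | exact Or.inr (Or.inl (Or.inr (Or.inl hP)))
              | exact Or.inr (Or.inl (Or.inr (Or.inr hP)))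
              | exact Or.inr (Or.inr (Or.inl hP))
              | exact Or.inr (Or.inr (Or.inr (Or.inl hP)))
              | exact Or.inr (Or.inr (Or.inr (Or.inr hP)))
    rw [key]

-- ===== VERDICT (by name: the statement is the Claim_ definition above) =====
theorem determine_number_spec : Claim_equal_determine_number := by
  intro num cdx ldx valid_nums content _ _
  unfold Spec_determine_number
  exact ports_eq num cdx ldx valid_nums content
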